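-- pv_equiv track=rewrite | github.com/martydill/Wizardry-6-reverse-engineering | tmp_pic_eval.py | decode_tiled_planar
-- ===== SOURCE A (Python) =====
-- def decode_tiled_planar(payload, width, height, msb_first=True):
--     pixels = [0] * (width * height)
--     pixel_idx = 0
--     i = 0
--     while i < len(payload) and pixel_idx < len(pixels):
--         for byte_in_tile in range(8):
--             if i + byte_in_tile >= len(payload):
--                 break
--             for bit in range(8):
--                 if pixel_idx >= len(pixels):
--                     break
--                 read_mask = (0x80 >> bit) if msb_first else (1 << bit)
--                 color = 0
--                 if i + byte_in_tile < len(payload) and payload[i + byte_in_tile] & read_mask: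
--                     color |= 0x01
--                 if i + byte_in_tile + 8 < len(payload) and payload[i + byte_in_tile + 8] & read_mask:
--                     color |= 0x02
--                 if i + byte_in_tile + 16 < len(payload) and payload[i + byte_in_tile + 16] & read_mask:
--                     color |= 0x04
--                 if i + byte_in_tile + 24 < len(payload) and payload[i + byte_in_tile + 24] & read_mask:
--                     color |= 0x08
--                 pixels[pixel_idx] = color
--                 pixel_idx += 1
--         i += 32
--     return pixels
-- ===== SOURCE B (Python) =====
-- def decode_tiled_planar(payload, width, height, msb_first=True):
--     pixels = [0] * (width * height)
--     n = len(payload)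
--     for idx in range(len(pixels)):
--         tile = idx // 64
--         byte_in_tile = (idx % 64) // 8
--         bit = idx % 8
--         base = 32 * tile + byte_in_tile
--         if base >= n:
--             break
--         mask = (0x80 >> bit) if msb_first else (1 << bit)
--         color = 0
--         for k, p in enumerate((0, 8, 16, 24)):
--             if base + p < n and payload[base + p] & mask:
--                 color |= 1 << k
--         pixels[idx] = color
--     return pixels
-- ===== Notes on version B (the rewrite author's own statement) =====
-- stated objective: simpler
-- what changed: A's nested while/for/for over tiles, bytes and bits is replaced by a single flat loop over the pixel index that recovers tile, byte and bit by division/modulus and breaks once the computed payload base runs past the end.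
import Mathlib
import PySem

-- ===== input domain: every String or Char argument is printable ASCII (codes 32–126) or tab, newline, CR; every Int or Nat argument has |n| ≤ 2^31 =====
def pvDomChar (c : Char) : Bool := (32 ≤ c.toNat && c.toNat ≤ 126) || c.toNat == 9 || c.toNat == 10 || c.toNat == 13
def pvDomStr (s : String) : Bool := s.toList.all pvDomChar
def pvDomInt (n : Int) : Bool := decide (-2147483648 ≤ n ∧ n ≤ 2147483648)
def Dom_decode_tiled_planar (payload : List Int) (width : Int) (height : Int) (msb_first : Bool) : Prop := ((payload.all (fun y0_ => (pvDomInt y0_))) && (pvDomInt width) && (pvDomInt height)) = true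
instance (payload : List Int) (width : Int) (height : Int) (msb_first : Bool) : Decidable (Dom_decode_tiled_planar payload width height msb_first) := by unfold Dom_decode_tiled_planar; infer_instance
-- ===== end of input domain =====

-- B replaces A's nested while/for/for over tiles, bytes and bits by one flat loop over the
-- pixel index that recovers tile/byte/bit by division; objective: simpler.

-- ===== PORT A =====
-- inner `for bit in range(8)` of A, counter form; returns (pixels, pixel_idx)
def aBitLoop (payload : List Int) (msb_first : Bool) (i b : Nat)
    (pixels : List Int) (pidx : Nat) (bit : Nat) : List Int × Nat :=
  if h : bit < 8 then
    if pixels.length ≤ pidx then (pixels, pidx)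
    else
      let read_mask : Int := if msb_first then (128 : Int) >>> bit else (1 : Int) <<< bit
      let color : Int := 0
      let color := if i + b < payload.length ∧ PySem.Int.band (payload.getD (i + b) 0) read_mask ≠ 0 then PySem.Int.bor color 1 else color
      let color := if i + b + 8 < payload.length ∧ PySem.Int.band (payload.getD (i + b + 8) 0) read_mask ≠ 0 then PySem.Int.bor color 2 else color
      let color := if i + b + 16 < payload.length ∧ PySem.Int.band (payload.getD (i + b + 16) 0) read_mask ≠ 0 then PySem.Int.bor color 4 else color
      let color := if i + b + 24 < payload.length ∧ PySem.Int.band (payload.getD (i + b + 24) 0) read_mask ≠ 0 then PySem.Int.bor color 8 else color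
      aBitLoop payload msb_first i b (pixels.set pidx color) (pidx + 1) (bit + 1)
  else (pixels, pidx)
termination_by 8 - bit

-- `for byte_in_tile in range(8)` of A, counter form
def aByteLoop (payload : List Int) (msb_first : Bool) (i : Nat)
    (pixels : List Int) (pidx : Nat) (b : Nat) : List Int × Nat :=
  if h : b < 8 then
    if payload.length ≤ i + b then (pixels, pidx)
    else
      let r := aBitLoop payload msb_first i b pixels pidx 0
      aByteLoop payload msb_first i r.1 r.2 (b + 1)
  else (pixels, pidx)
termination_by 8 - b

-- the outer `while i < len(payload) and pixel_idx < len(pixels)` of A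
def aWhile (payload : List Int) (msb_first : Bool)
    (pixels : List Int) (pidx : Nat) (i : Nat) : List Int :=
  if h : i < payload.length ∧ pidx < pixels.length then
    let r := aByteLoop payload msb_first i pixels pidx 0
    aWhile payload msb_first r.1 r.2 (i + 32)
  else pixels
termination_by payload.length - i
decreasing_by omega

def decode_tiled_planar (payload : List Int) (width : Int) (height : Int) (msb_first : Bool) : List Int :=
  aWhile payload msb_first (List.replicate (width * height).toNat 0) 0 0

-- ===== PORT B =====
-- B's single `for idx in range(len(pixels))` with its break
def bLoop (payload : List Int) (msb_first : Bool) (pixels : List Int) (idx : Nat) : List Int :=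
  if h : idx < pixels.length then
    let tile := idx / 64
    let byte_in_tile := idx % 64 / 8
    let bit := idx % 8
    let base := 32 * tile + byte_in_tile
    if payload.length ≤ base then pixels
    else
      let mask : Int := if msb_first then (128 : Int) >>> bit else (1 : Int) <<< bit
      let color : Int := (PySem.List.enumerate ([0, 8, 16, 24] : List Nat)).foldl
        (fun c kp =>
          if base + kp.2 < payload.length ∧ PySem.Int.band (payload.getD (base + kp.2) 0) mask ≠ 0
          then PySem.Int.bor c ((1 : Int) <<< kp.1) else c) 0
      bLoop payload msb_first (pixels.set idx color) (idx + 1)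
  else pixels
termination_by pixels.length - idx
decreasing_by simp; omega

def decode_tiled_planar_alt (payload : List Int) (width : Int) (height : Int) (msb_first : Bool) : List Int :=
  bLoop payload msb_first (List.replicate (width * height).toNat 0) 0

-- ===== PRECONDITION & SPEC =====
def Spec_decode_tiled_planar (payload : List Int) (width : Int) (height : Int) (msb_first : Bool) (out : List Int) : Prop := out = decode_tiled_planar_alt payload width height msb_first
instance (payload : List Int) (width : Int) (height : Int) (msb_first : Bool) (out : List Int) : Decidable (Spec_decode_tiled_planar payload width height msb_first out) := by unfold Spec_decode_tiled_planar; infer_instance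

-- ===== CLAIM (what is proved, stated in full; the proofs are below) =====
def Claim_equal_decode_tiled_planar : Prop := ∀ (payload : List Int) (width : Int) (height : Int) (msb_first : Bool), Dom_decode_tiled_planar payload width height msb_first → Spec_decode_tiled_planar payload width height msb_first (decode_tiled_planar payload width height msb_first)

-- ===== LEMMAS AND PROOFS =====

lemma bLoop_idle (payload : List Int) (msb_first : Bool) (pixels : List Int) (idx : Nat)
    (h : pixels.length ≤ idx) : bLoop payload msb_first pixels idx = pixels := by
  rw [bLoop]; simp [Nat.not_lt.mpr h]

lemma aBitLoop_idle (payload : List Int) (msb_first : Bool) (i b : Nat)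
    (pixels : List Int) (pidx : Nat) (k : Nat) (h : pixels.length ≤ pidx) :
    aBitLoop payload msb_first i b pixels pidx k = (pixels, pidx) := by
  rw [aBitLoop]
  by_cases hk : k < 8 <;> simp [hk, h]

lemma aByteLoop_idle (payload : List Int) (msb_first : Bool) (i : Nat)
    (pixels : List Int) (pidx : Nat) (h : pixels.length ≤ pidx) :
    ∀ j b, b + j = 8 → aByteLoop payload msb_first i pixels pidx b = (pixels, pidx) := by
  intro j
  induction j with
  | zero => intro b hb; rw [aByteLoop]; simp [show ¬ b < 8 by omega]
  | succ j ih =>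
    intro b hb
    rw [aByteLoop]
    by_cases hlen : payload.length ≤ i + b
    · simp [show b < 8 by omega, hlen]
    · simp only [show b < 8 by omega, dif_pos, hlen]
      rw [aBitLoop_idle payload msb_first i b pixels pidx 0 h]
      simp
      exact ih (b + 1) (by omega)

-- one A bit-loop run (at tile t, byte b, from bit k) advances B's flat loop in lock-step
lemma bitEq (payload : List Int) (msb_first : Bool) (t b : Nat) (hb : b < 8)
    (hbase : 32 * t + b < payload.length) :
    ∀ j k, k + j = 8 → ∀ (pixels : List Int) (pidx : Nat), pidx = 64 * t + 8 * b + k →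
    (bLoop payload msb_first pixels pidx
        = bLoop payload msb_first (aBitLoop payload msb_first (32 * t) b pixels pidx k).1
            (aBitLoop payload msb_first (32 * t) b pixels pidx k).2)
    ∧ (aBitLoop payload msb_first (32 * t) b pixels pidx k).1.length = pixels.length
    ∧ ((aBitLoop payload msb_first (32 * t) b pixels pidx k).2 = 64 * t + 8 * b + 8
        ∨ (aBitLoop payload msb_first (32 * t) b pixels pidx k).1.length
            ≤ (aBitLoop payload msb_first (32 * t) b pixels pidx k).2) := by
  intro j
  induction j with
  | zero =>
    intro k hk pixels pidx hpidx
    rw [aBitLoop]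
    simp [show ¬ k < 8 by omega]
    omega
  | succ j ih =>
    intro k hk pixels pidx hpidx
    have hk8 : k < 8 := by omega
    by_cases hend : pixels.length ≤ pidx
    · rw [aBitLoop]; simp [hk8, hend]
    · rw [aBitLoop]
      simp only [hk8, dif_pos, hend]
      have h64 : pidx / 64 = t := by omega
      have h8 : pidx % 64 / 8 = b := by omega
      have hbit : pidx % 8 = k := by omega
      have hcolor :
          ((PySem.List.enumerate ([0, 8, 16, 24] : List Nat)).foldl
            (fun c kp =>
              if 32 * (pidx / 64) + pidx % 64 / 8 + kp.2 < payload.length ∧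
                  PySem.Int.band (payload.getD (32 * (pidx / 64) + pidx % 64 / 8 + kp.2) 0)
                    (if msb_first then (128 : Int) >>> (pidx % 8) else (1 : Int) <<< (pidx % 8)) ≠ 0
              then PySem.Int.bor c ((1 : Int) <<< kp.1) else c) 0 : Int)
          = (let read_mask : Int := if msb_first then (128 : Int) >>> k else (1 : Int) <<< k
             let color : Int := 0
             let color := if 32 * t + b < payload.length ∧ PySem.Int.band (payload.getD (32 * t + b) 0) read_mask ≠ 0 then PySem.Int.bor color 1 else color
             let color := if 32 * t + b + 8 < payload.length ∧ PySem.Int.band (payload.getD (32 * t + b + 8) 0) read_mask ≠ 0 then PySem.Int.bor color 2 else color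
             let color := if 32 * t + b + 16 < payload.length ∧ PySem.Int.band (payload.getD (32 * t + b + 16) 0) read_mask ≠ 0 then PySem.Int.bor color 4 else color
             if 32 * t + b + 24 < payload.length ∧ PySem.Int.band (payload.getD (32 * t + b + 24) 0) read_mask ≠ 0 then PySem.Int.bor color 8 else color) := by
        rw [h64, h8, hbit]
        simp only [PySem.List.enumerate, List.foldl]
        norm_num
        simp only [show ((1:Int) <<< 0) = 1 by decide, show ((1:Int) <<< 1) = 2 by decide,
          show ((1:Int) <<< 2) = 4 by decide, show ((1:Int) <<< 3) = 8 by decide]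
      have hstep : bLoop payload msb_first pixels pidx
          = bLoop payload msb_first
              (pixels.set pidx
                (let read_mask : Int := if msb_first then (128 : Int) >>> k else (1 : Int) <<< k
                 let color : Int := 0
                 let color := if 32 * t + b < payload.length ∧ PySem.Int.band (payload.getD (32 * t + b) 0) read_mask ≠ 0 then PySem.Int.bor color 1 else color
                 let color := if 32 * t + b + 8 < payload.length ∧ PySem.Int.band (payload.getD (32 * t + b + 8) 0) read_mask ≠ 0 then PySem.Int.bor color 2 else color
                 let color := if 32 * t + b + 16 < payload.length ∧ PySem.Int.band (payload.getD (32 * t + b + 16) 0) read_mask ≠ 0 then PySem.Int.bor color 4 else color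
                 if 32 * t + b + 24 < payload.length ∧ PySem.Int.band (payload.getD (32 * t + b + 24) 0) read_mask ≠ 0 then PySem.Int.bor color 8 else color))
              (pidx + 1) := by
        conv_lhs => rw [bLoop]
        simp only [show pidx < pixels.length by omega, dif_pos]
        rw [if_neg (by rw [h64, h8]; omega)]
        rw [hcolor]
      obtain ⟨ih1, ih2, ih3⟩ := ih (k + 1) (by omega) (pixels.set pidx _) (pidx + 1) (by omega)
      refine ⟨hstep.trans ih1, by simpa using ih2, by simpa using ih3⟩

-- one A byte-loop run (whole tile t from byte b) matches B's flat loop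
lemma byteEq (payload : List Int) (msb_first : Bool) (t : Nat) :
    ∀ j b, b + j = 8 → ∀ (pixels : List Int) (pidx : Nat), pidx = 64 * t + 8 * b →
    (bLoop payload msb_first pixels pidx
        = bLoop payload msb_first (aByteLoop payload msb_first (32 * t) pixels pidx b).1
            (aByteLoop payload msb_first (32 * t) pixels pidx b).2)
    ∧ ((aByteLoop payload msb_first (32 * t) pixels pidx b).2 = 64 * t + 64
        ∨ ((payload.length ≤ 32 * t + 7
              ∨ (aByteLoop payload msb_first (32 * t) pixels pidx b).1.length
                  ≤ (aByteLoop payload msb_first (32 * t) pixels pidx b).2)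
            ∧ bLoop payload msb_first (aByteLoop payload msb_first (32 * t) pixels pidx b).1
                (aByteLoop payload msb_first (32 * t) pixels pidx b).2
              = (aByteLoop payload msb_first (32 * t) pixels pidx b).1)) := by
  intro j
  induction j with
  | zero =>
    intro b hb pixels pidx hpidx
    have hstop : aByteLoop payload msb_first (32 * t) pixels pidx b = (pixels, pidx) := by
      rw [aByteLoop]; simp [show ¬ b < 8 by omega]
    rw [hstop]
    exact ⟨rfl, Or.inl (by omega)⟩
  | succ j ih =>
    intro b hb pixels pidx hpidx
    have hb8 : b < 8 := by omega
    by_cases hbrk : payload.length ≤ 32 * t + b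
    · -- byte break: payload exhausted inside the tile
      rw [aByteLoop]
      simp only [hb8, dif_pos, hbrk, if_pos]
      refine ⟨trivial, Or.inr ⟨Or.inl (by omega), ?_⟩⟩
      rw [bLoop]
      by_cases hlt : pidx < pixels.length
      · simp only [hlt, dif_pos]
        rw [if_pos]
        omega
      · simp [hlt]
    · have hbase : 32 * t + b < payload.length := by omega
      rw [aByteLoop]
      simp only [hb8, dif_pos, hbrk]
      obtain ⟨e1, elen, edisj⟩ := bitEq payload msb_first t b hb8 hbase 8 0 rfl pixels pidx (by omega)
      set r := aBitLoop payload msb_first (32 * t) b pixels pidx 0 with hr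
      rcases edisj with hfull | hidle
      · obtain ⟨f1, f2⟩ := ih (b + 1) (by omega) r.1 r.2 (by omega)
        exact ⟨e1.trans f1, f2⟩
      · rw [aByteLoop_idle payload msb_first (32 * t) r.1 r.2 hidle j (b + 1) (by omega)]
        exact ⟨e1, Or.inr ⟨Or.inr hidle, bLoop_idle _ _ _ _ hidle⟩⟩

lemma bLoop_break (payload : List Int) (msb_first : Bool) (pixels : List Int) (idx : Nat)
    (h : payload.length ≤ 32 * (idx / 64) + idx % 64 / 8) :
    bLoop payload msb_first pixels idx = pixels := by
  rw [bLoop]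
  by_cases hl : idx < pixels.length
  · simp [hl, h]
  · simp [hl]

lemma tileEq (payload : List Int) (msb_first : Bool) :
    ∀ n t, payload.length - 32 * t ≤ n → ∀ pixels : List Int,
    aWhile payload msb_first pixels (64 * t) (32 * t) = bLoop payload msb_first pixels (64 * t) := by
  intro n
  induction n with
  | zero =>
    intro t hn pixels
    have hc : ¬ (32 * t < payload.length ∧ 64 * t < pixels.length) := by omega
    rw [aWhile, dif_neg hc, bLoop_break payload msb_first pixels (64 * t) (by omega)]
  | succ n ih =>
    intro t hn pixels
    by_cases hc : 32 * t < payload.length ∧ 64 * t < pixels.length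
    · rw [aWhile, dif_pos hc]
      obtain ⟨e1, edisj⟩ := byteEq payload msb_first t 8 0 rfl pixels (64 * t) (by omega)
      set r := aByteLoop payload msb_first (32 * t) pixels (64 * t) 0 with hr
      show aWhile payload msb_first r.1 r.2 (32 * t + 32) = bLoop payload msb_first pixels (64 * t)
      rcases edisj with hfull | ⟨hstop, hret⟩
      · have hrec : aWhile payload msb_first r.1 r.2 (32 * t + 32)
            = bLoop payload msb_first r.1 r.2 := by
          have h1 : (32 : Nat) * t + 32 = 32 * (t + 1) := by ring
          have h2 : r.2 = 64 * (t + 1) := by omega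
          rw [h1, h2]
          exact ih (t + 1) (by omega) r.1
        rw [hrec, ← e1]
      · have hcond : ¬ (32 * t + 32 < payload.length ∧ r.2 < r.1.length) := by
          rcases hstop with h | h <;> (intro hh; omega)
        rw [aWhile, dif_neg hcond, e1, hret]
    · rw [aWhile, dif_neg hc, bLoop]
      by_cases hlt : 64 * t < pixels.length
      · rw [dif_pos hlt]
        have hlen : payload.length ≤ 32 * t := by omega
        simp only []
        rw [if_pos (show payload.length ≤ 32 * (64 * t / 64) + 64 * t % 64 / 8 by omega)]
      · rw [dif_neg hlt]

-- ===== VERDICT (by name: the statement is the Claim_ definition above) =====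
theorem decode_tiled_planar_spec : Claim_equal_decode_tiled_planar := by
  intro payload width height msb_first _
  unfold Spec_decode_tiled_planar decode_tiled_planar decode_tiled_planar_alt
  have := tileEq payload msb_first payload.length 0 (by omega)
      (List.replicate (width * height).toNat 0)
  simpa using this
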